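-- pv_equiv track=rewrite | github.com/strvdr/kirin-autonomous-chess | kirin/tools/train_nnue.py | passed_mask
-- ===== SOURCE A (Python) =====
-- def passed_mask(square: int, white: bool) -> int:
--     file_index = square % 8
--     rank_index = square // 8
--     mask = 0
--     files = [file_index - 1, file_index, file_index + 1]
--     ranks = range(0, rank_index) if white else range(rank_index + 1, 8)
--     for rank in ranks:
--         for file in files:
--             if 0 <= file <= 7:
--                 mask |= 1 << (rank * 8 + file)
--     return mask
-- ===== SOURCE B (Python) =====
-- def _fbits(file_index: int) -> int:
--     low = max(file_index - 1, 0)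
--     high = min(file_index + 1, 7)
--     return (1 << (high + 1)) - (1 << low)
--
--
-- def passed_mask(square: int, white: bool) -> int:
--     # closed form: contiguous 3-file byte pattern times a geometric sum of rank bytes
--     fbits = _fbits(square % 8)
--     if white:
--         lo, hi = 0, max(square // 8, 0)
--     else:
--         lo, hi = min(square // 8 + 1, 8), 8
--     return fbits * ((256 ** hi - 256 ** lo) // 255)
-- ===== Notes on version B (the rewrite author's own statement) =====
-- stated objective: faster
-- what changed: replaces the nested rank*file bit-setting loops by a closed form: a 3-file byte pattern multiplied by a geometric sum of rank bytes (256**hi - 256**lo)//255, no loops at all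
import Mathlib
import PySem

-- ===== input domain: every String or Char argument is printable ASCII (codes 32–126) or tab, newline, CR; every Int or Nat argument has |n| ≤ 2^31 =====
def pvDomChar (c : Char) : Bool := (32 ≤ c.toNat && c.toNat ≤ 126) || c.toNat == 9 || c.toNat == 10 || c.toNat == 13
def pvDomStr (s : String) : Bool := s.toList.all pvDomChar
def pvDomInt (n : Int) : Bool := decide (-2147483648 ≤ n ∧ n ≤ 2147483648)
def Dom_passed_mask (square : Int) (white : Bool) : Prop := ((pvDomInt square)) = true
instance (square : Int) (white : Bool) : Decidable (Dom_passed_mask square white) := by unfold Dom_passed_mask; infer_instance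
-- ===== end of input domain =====

-- B replaces the nested bit-setting loops with a closed-form product (a 3-file byte pattern times a geometric sum of rank bytes); no loops.

-- ===== PORT A =====
-- shift '1 << e' is ported as '1 <<< e.toNat'; exact for e ≥ 0, and e < 0 (Python ValueError) is excluded by Pre_
def passed_mask (square : Int) (white : Bool) : Int :=
  let file_index := PySem.Int.mod square 8
  let rank_index := PySem.Int.floordiv square 8
  let files := [file_index - 1, file_index, file_index + 1]
  let ranks := if white then PySem.List.pyRange 0 rank_index 1 else PySem.List.pyRange (rank_index + 1) 8 1
  ranks.foldl (fun (mask : Int) (rank : Int) =>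
    files.foldl (fun (m : Int) (f : Int) =>
      if 0 ≤ f ∧ f ≤ 7 then PySem.Int.bor m ((1 : Int) <<< (rank * 8 + f).toNat) else m) mask) 0

-- ===== PORT B =====
def pvFbits (file_index : Int) : Int :=
  let low := max (file_index - 1) 0
  let high := min (file_index + 1) 7
  ((1 : Int) <<< (high + 1).toNat) - ((1 : Int) <<< low.toNat)

def passed_mask_alt (square : Int) (white : Bool) : Int :=
  let fbits := pvFbits (PySem.Int.mod square 8)
  let lo : Int := if white then 0 else min (PySem.Int.floordiv square 8 + 1) 8
  let hi : Int := if white then max (PySem.Int.floordiv square 8) 0 else 8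
  fbits * PySem.Int.floordiv ((256 : Int) ^ hi.toNat - (256 : Int) ^ lo.toNat) 255

-- ===== PRECONDITION & SPEC =====
-- Pre_ excludes exactly the inputs where A raises ValueError: black with square ≤ -9
-- (the rank range then contains a negative rank, so '1 << negative' raises).
def Pre_passed_mask (square : Int) (white : Bool) : Prop := white = false → -8 ≤ square
instance (square : Int) (white : Bool) : Decidable (Pre_passed_mask square white) := by unfold Pre_passed_mask; infer_instance
def pvWitness_passed_mask : Int × Bool := (12, false)
def Spec_passed_mask (square : Int) (white : Bool) (out : Int) : Prop := out = passed_mask_alt square white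
instance (square : Int) (white : Bool) (out : Int) : Decidable (Spec_passed_mask square white out) := by unfold Spec_passed_mask; infer_instance

-- ===== CLAIM (what is proved, stated in full; the proofs are below) =====
def Claim_equal_passed_mask : Prop := ∀ (square : Int) (white : Bool), Dom_passed_mask square white → Pre_passed_mask square white → Spec_passed_mask square white (passed_mask square white)

-- ===== LEMMAS AND PROOFS =====

-- disjoint OR is addition (Nat level)
theorem pv_nat_or_pow : ∀ (k : Nat) (b a : Nat), b < 2^k → (a <<< k) ||| b = a <<< k + b := by
  intro k
  induction k with
  | zero => intro b a hb; interval_cases b; simp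
  | succ k ih =>
    intro b a hb
    have hb2 : b / 2 < 2 ^ k := by
      have := Nat.pow_succ 2 k ▸ hb; omega
    have h1 : a <<< (k+1) = 2 * (a <<< k) := by
      rw [Nat.shiftLeft_eq, Nat.shiftLeft_eq, Nat.pow_succ]; ring
    have hd : (Nat.bodd b).toNat + 2 * Nat.div2 b = b := Nat.bodd_add_div2 b
    have hdv : Nat.div2 b = b / 2 := Nat.div2_val b
    have hbitb : Nat.bit (Nat.bodd b) (b/2) = b := by rw [Nat.bit_val]; omega
    have hbita : Nat.bit false (a <<< k) = a <<< (k+1) := by simp [Nat.bit_val, h1]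
    calc a <<< (k+1) ||| b = Nat.bit false (a <<< k) ||| Nat.bit (Nat.bodd b) (b/2) := by
          rw [hbitb, hbita]
    _ = Nat.bit (false || Nat.bodd b) ((a <<< k) ||| (b/2)) := Nat.lor_bit ..
    _ = Nat.bit (Nat.bodd b) (a <<< k + b/2) := by rw [ih _ _ hb2, Bool.false_or]
    _ = a <<< (k+1) + b := by rw [Nat.bit_val]; omega

-- OR-ing in a fresh high bit is addition (Int level)
theorem pv_bor_pow (a : Int) (k : Nat) (h0 : 0 ≤ a) (h : a < 2^k) :
    PySem.Int.bor a ((1 : Int) <<< k) = a + 2^k := by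
  have hs : ((1 : Int) <<< k) = 2^k := by rw [Int.shiftLeft_eq]; ring
  have hnn : (0:Int) ≤ 2^k := by positivity
  have hcast : ((2:Int)^k) = ((2^k : Nat) : Int) := by push_cast; ring
  rw [hs, PySem.Int.bor_of_nonneg h0 hnn]
  have ht : ((2:Int)^k).toNat = 2^k := by rw [hcast, Int.toNat_natCast]
  have hlt : a.toNat < 2^k := by omega
  have hsh : (1 : Nat) <<< k = 2^k := by rw [Nat.shiftLeft_eq, one_mul]
  rw [ht, Nat.lor_comm, ← hsh, pv_nat_or_pow k a.toNat 1 hlt]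
  push_cast [hsh]
  omega

-- two consecutive fresh bits
theorem pv_two (m : Int) (k : Nat) (h0 : 0 ≤ m) (h : m < 2^k) :
    PySem.Int.bor (PySem.Int.bor m ((1:Int) <<< k)) ((1:Int) <<< (k+1)) = m + 3 * 2^k := by
  have hp : (2:Int)^(k+1) = 2^k * 2 := pow_succ 2 k
  have hnn : (0:Int) ≤ 2^k := by positivity
  rw [pv_bor_pow m k h0 h, pv_bor_pow (m + 2^k) (k+1) (by linarith) (by rw [hp]; linarith)]
  linarith

-- three consecutive fresh bits
theorem pv_three (m : Int) (k : Nat) (h0 : 0 ≤ m) (h : m < 2^k) :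
    PySem.Int.bor (PySem.Int.bor (PySem.Int.bor m ((1:Int) <<< k)) ((1:Int) <<< (k+1))) ((1:Int) <<< (k+2))
      = m + 7 * 2^k := by
  have hp : (2:Int)^(k+1) = 2^k * 2 := pow_succ 2 k
  have hp2 : (2:Int)^(k+2) = 2^(k+1) * 2 := pow_succ 2 (k+1)
  have hnn : (0:Int) ≤ 2^k := by positivity
  rw [pv_two m k h0 h, pv_bor_pow (m + 3*2^k) (k+2) (by linarith) (by rw [hp2, hp]; linarith)]
  linarith

theorem pv_fbits_bounds (fi : Int) (h0 : 0 ≤ fi) (h8 : fi < 8) :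
    0 ≤ pvFbits fi ∧ pvFbits fi ≤ 255 := by
  interval_cases fi <;> decide

-- A's inner file loop at one rank adds the 3-file pattern shifted to that rank
theorem pv_inner (fi r m : Int) (hfi0 : 0 ≤ fi) (hfi8 : fi < 8) (hr : 0 ≤ r)
    (hm0 : 0 ≤ m) (hm : m < 2^((r*8).toNat)) :
    [fi - 1, fi, fi + 1].foldl (fun (m : Int) (f : Int) =>
        if 0 ≤ f ∧ f ≤ 7 then PySem.Int.bor m ((1 : Int) <<< (r * 8 + f).toNat) else m) m
      = m + pvFbits fi * 2^((r*8).toNat) := by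
  have hk8 : (0:Int) ≤ r * 8 := by linarith
  have hmono : ∀ c : Nat, (2:Int)^((r*8).toNat) ≤ 2^((r*8).toNat + c) :=
    fun c => pow_le_pow_right₀ (by norm_num) (by omega)
  interval_cases fi <;> simp only [List.foldl] <;> norm_num
  · -- fi = 0
    have e1 : (r * 8 + 1).toNat = (r * 8).toNat + 1 := by omega
    rw [e1, pv_two m ((r * 8).toNat) hm0 hm]
    have hfb : pvFbits 0 = 3 := by decide
    first
    | (rw [hfb]; ring)
    | rw [hfb]
  · -- fi = 1
    have e1 : (r * 8 + 1).toNat = (r * 8).toNat + 1 := by omega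
    have e2 : (r * 8 + 2).toNat = (r * 8).toNat + 2 := by omega
    rw [e1, e2, pv_three m ((r * 8).toNat) hm0 hm]
    have hfb : pvFbits 1 = 7 := by decide
    first
    | (rw [hfb]; ring)
    | rw [hfb]
  · -- fi = 2
    have e1 : (r * 8 + 1).toNat = (r * 8).toNat + 1 := by omega
    have e2 : (r * 8 + 2).toNat = (r * 8).toNat + 1 + 1 := by omega
    have e3 : (r * 8 + 3).toNat = (r * 8).toNat + 1 + 2 := by omega
    rw [e1, e2, e3, pv_three m ((r * 8).toNat + 1) hm0 (lt_of_lt_of_le hm (hmono 1))]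
    have hfb : pvFbits 2 = 14 := by decide
    first
    | (rw [hfb]; ring)
    | rw [hfb]
  · -- fi = 3
    have e2 : (r * 8 + 2).toNat = (r * 8).toNat + 2 := by omega
    have e3 : (r * 8 + 3).toNat = (r * 8).toNat + 2 + 1 := by omega
    have e4 : (r * 8 + 4).toNat = (r * 8).toNat + 2 + 2 := by omega
    rw [e2, e3, e4, pv_three m ((r * 8).toNat + 2) hm0 (lt_of_lt_of_le hm (hmono 2))]
    have hfb : pvFbits 3 = 28 := by decide
    first
    | (rw [hfb]; ring)
    | rw [hfb]
  · -- fi = 4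
    have e3 : (r * 8 + 3).toNat = (r * 8).toNat + 3 := by omega
    have e4 : (r * 8 + 4).toNat = (r * 8).toNat + 3 + 1 := by omega
    have e5 : (r * 8 + 5).toNat = (r * 8).toNat + 3 + 2 := by omega
    rw [e3, e4, e5, pv_three m ((r * 8).toNat + 3) hm0 (lt_of_lt_of_le hm (hmono 3))]
    have hfb : pvFbits 4 = 56 := by decide
    first
    | (rw [hfb]; ring)
    | rw [hfb]
  · -- fi = 5
    have e4 : (r * 8 + 4).toNat = (r * 8).toNat + 4 := by omega
    have e5 : (r * 8 + 5).toNat = (r * 8).toNat + 4 + 1 := by omega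
    have e6 : (r * 8 + 6).toNat = (r * 8).toNat + 4 + 2 := by omega
    rw [e4, e5, e6, pv_three m ((r * 8).toNat + 4) hm0 (lt_of_lt_of_le hm (hmono 4))]
    have hfb : pvFbits 5 = 112 := by decide
    first
    | (rw [hfb]; ring)
    | rw [hfb]
  · -- fi = 6
    have e5 : (r * 8 + 5).toNat = (r * 8).toNat + 5 := by omega
    have e6 : (r * 8 + 6).toNat = (r * 8).toNat + 5 + 1 := by omega
    have e7 : (r * 8 + 7).toNat = (r * 8).toNat + 5 + 2 := by omega
    rw [e5, e6, e7, pv_three m ((r * 8).toNat + 5) hm0 (lt_of_lt_of_le hm (hmono 5))]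
    have hfb : pvFbits 6 = 224 := by decide
    first
    | (rw [hfb]; ring)
    | rw [hfb]
  · -- fi = 7
    have e6 : (r * 8 + 6).toNat = (r * 8).toNat + 6 := by omega
    have e7 : (r * 8 + 7).toNat = (r * 8).toNat + 6 + 1 := by omega
    rw [e6, e7, pv_two m ((r * 8).toNat + 6) hm0 (lt_of_lt_of_le hm (hmono 6))]
    have hfb : pvFbits 7 = 192 := by decide
    first
    | (rw [hfb]; ring)
    | rw [hfb]


-- geometric sum of rank bytes
def pvGeom : Nat → Nat → Int
  | _, 0 => 0
  | a, n+1 => 256^a + pvGeom (a+1) n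

theorem pv_geom_nonneg (a n : Nat) : 0 ≤ pvGeom a n := by
  induction n generalizing a with
  | zero => simp [pvGeom]
  | succ n ih => have := ih (a+1); simp [pvGeom]; positivity

theorem pv_geom_eq (n a : Nat) : 255 * pvGeom a n = 256^(a+n) - 256^a := by
  induction n generalizing a with
  | zero => simp [pvGeom]
  | succ n ih =>
    have h := ih (a+1)
    have : (256:Int)^(a+1) = 256^a * 256 := pow_succ 256 a
    simp only [pvGeom]
    have h2 : a + 1 + n = a + (n+1) := by omega
    rw [mul_add, h, h2] at *
    linarith

theorem pv_floordiv_geom (a n : Nat) :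
    PySem.Int.floordiv ((256:Int)^(a+n) - 256^a) 255 = pvGeom a n := by
  rw [PySem.Int.floordiv_eq_iff_of_pos (by norm_num)]
  have h := pv_geom_eq n a
  constructor <;> nlinarith [pv_geom_nonneg a n]

-- A's rank loop computes fbits * (geometric sum of rank bytes)
theorem pv_outer (fi : Int) (hfi0 : 0 ≤ fi) (hfi8 : fi < 8) :
    ∀ (n : Nat) (a m : Int), 0 ≤ a → 0 ≤ m → m < 2^((a*8).toNat) →
    (PySem.List.pyRange a (a + n) 1).foldl (fun (mask : Int) (rank : Int) =>
        [fi - 1, fi, fi + 1].foldl (fun (m : Int) (f : Int) =>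
          if 0 ≤ f ∧ f ≤ 7 then PySem.Int.bor m ((1 : Int) <<< (rank * 8 + f).toNat) else m) mask) m
      = m + pvFbits fi * pvGeom a.toNat n := by
  intro n
  induction n with
  | zero =>
    intro a m ha hm0 hm
    rw [show a + ((0:Nat):Int) = a by push_cast; ring, PySem.List.pyRange_one_eq_nil (le_refl a)]
    simp [pvGeom]
  | succ n ih =>
    intro a m ha hm0 hm
    obtain ⟨hfb0, hfb255⟩ := pv_fbits_bounds fi hfi0 hfi8
    have hlt : a < a + ((n+1 : Nat):Int) := by push_cast; omega
    rw [PySem.List.pyRange_one_cons hlt, List.foldl_cons]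
    rw [pv_inner fi a m hfi0 hfi8 ha hm0 hm]
    have hsh : a + ((n+1 : Nat):Int) = (a + 1) + ((n : Nat):Int) := by push_cast; ring
    rw [hsh]
    have ht0 : (0:Int) < 2^((a*8).toNat) := by positivity
    have hbound : m + pvFbits fi * 2^((a*8).toNat) < 2^(((a+1)*8).toNat) := by
      have e : ((a+1)*8).toNat = (a*8).toNat + 8 := by omega
      rw [e, pow_add]
      have : pvFbits fi * 2^((a*8).toNat) ≤ 255 * 2^((a*8).toNat) :=
        mul_le_mul_of_nonneg_right hfb255 (le_of_lt ht0)
      nlinarith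
    rw [ih (a+1) (m + pvFbits fi * 2^((a*8).toNat)) (by omega)
        (by nlinarith) hbound]
    have e1 : (a+1).toNat = a.toNat + 1 := by omega
    have e2 : (2:Int)^((a*8).toNat) = 256^a.toNat := by
      rw [show (a*8).toNat = 8 * a.toNat by omega, pow_mul]
      norm_num
    rw [e1, e2, show pvGeom a.toNat (n+1) = 256^a.toNat + pvGeom (a.toNat+1) n from rfl]
    ring

-- ===== VERDICT (by name: the statement is the Claim_ definition above) =====
theorem passed_mask_spec : Claim_equal_passed_mask := by
  intro square white hdom hpre
  unfold Spec_passed_mask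
  simp only [passed_mask, passed_mask_alt]
  have hfi0 : 0 ≤ PySem.Int.mod square 8 := PySem.Int.mod_nonneg square (by norm_num)
  have hfi8 : PySem.Int.mod square 8 < 8 := PySem.Int.mod_lt square (by norm_num)
  have hdm : PySem.Int.floordiv square 8 * 8 + PySem.Int.mod square 8 = square :=
    PySem.Int.floordiv_mul_add_mod square 8
  cases white with
  | true =>
    simp only [if_true]
    by_cases hri : 0 < PySem.Int.floordiv square 8
    · have h := pv_outer (PySem.Int.mod square 8) hfi0 hfi8
        (PySem.Int.floordiv square 8).toNat 0 0 (le_refl 0) (le_refl 0) (by norm_num)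
      rw [show (0:Int) + (((PySem.Int.floordiv square 8).toNat : Nat) : Int)
            = PySem.Int.floordiv square 8 by omega] at h
      rw [h]
      have hmax : max (PySem.Int.floordiv square 8) 0 = PySem.Int.floordiv square 8 := by omega
      rw [hmax]
      have hg := pv_floordiv_geom 0 (PySem.Int.floordiv square 8).toNat
      simp only [Nat.zero_add] at hg
      rw [show ((0:Int)).toNat = 0 from rfl, hg]
      simp
    · rw [PySem.List.pyRange_one_eq_nil (by omega)]
      have hmax : max (PySem.Int.floordiv square 8) 0 = 0 := by omega
      rw [hmax]
      norm_num [PySem.Int.floordiv]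
  | false =>
    simp only [if_false, Bool.false_eq_true]
    have h8 : -8 ≤ square := hpre rfl
    have hmod8 : PySem.Int.mod square 8 < 8 := hfi8
    have hri1 : -1 ≤ PySem.Int.floordiv square 8 := by omega
    by_cases h8r : PySem.Int.floordiv square 8 + 1 < 8
    · have h := pv_outer (PySem.Int.mod square 8) hfi0 hfi8
        ((8 - (PySem.Int.floordiv square 8 + 1)).toNat)
        (PySem.Int.floordiv square 8 + 1) 0 (by omega) (le_refl 0) (by positivity)
      rw [show PySem.Int.floordiv square 8 + 1 +
            (((8 - (PySem.Int.floordiv square 8 + 1)).toNat : Nat) : Int) = 8 by omega] at h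
      rw [h]
      have hmin : min (PySem.Int.floordiv square 8 + 1) 8 = PySem.Int.floordiv square 8 + 1 := by omega
      rw [hmin]
      have hg := pv_floordiv_geom (PySem.Int.floordiv square 8 + 1).toNat
        ((8 - (PySem.Int.floordiv square 8 + 1)).toNat)
      rw [show (PySem.Int.floordiv square 8 + 1).toNat +
            (8 - (PySem.Int.floordiv square 8 + 1)).toNat = 8 by omega] at hg
      rw [show ((8:Int)).toNat = 8 from rfl, hg]
      ring
    · rw [PySem.List.pyRange_one_eq_nil (by omega)]
      have hmin : min (PySem.Int.floordiv square 8 + 1) 8 = 8 := by omega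
      rw [hmin]
      norm_num [PySem.Int.floordiv]
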